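-- pv_equiv track=rewrite | github.com/binayuchai/DSA-practice- | String_python/check_even_count_PalindromeSubString/bruteForce.py | EvenCountPalindromeSubString
-- ===== SOURCE A (Python) =====
-- def EvenCountPalindromeSubString(s):
--     countEven = 0
--
--     for i in range(0,(len(s)-1)): # n
--         str1=""
--         for j in range(i+1,len(s)): # n
--             str1 += s[i]
--             str1 +=s[j]
--             str2 = ""
--             for k in range(j,i-1,-1): # i+j
--                 str2 += s[k]
--             if str1 == str2 and len(str1) % 2 == 0:
--                countEven +=1
--     if countEven > 1:
--         return "YES"
--     return "NO"
-- ===== SOURCE B (Python) =====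
-- def EvenCountPalindromeSubString(s):
--     count = sum(1 for a, b in zip(s, s[1:]) if a == b)
--     return "YES" if count > 1 else "NO"
-- ===== Notes on version B (the rewrite author's own statement) =====
-- stated objective: faster
-- what changed: A's triple loop over substrings only ever succeeds when j=i+1 (the built strings have different lengths otherwise), so B replaces it with a single pass counting adjacent equal character pairs and answers YES iff that count exceeds 1.
import Mathlib
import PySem

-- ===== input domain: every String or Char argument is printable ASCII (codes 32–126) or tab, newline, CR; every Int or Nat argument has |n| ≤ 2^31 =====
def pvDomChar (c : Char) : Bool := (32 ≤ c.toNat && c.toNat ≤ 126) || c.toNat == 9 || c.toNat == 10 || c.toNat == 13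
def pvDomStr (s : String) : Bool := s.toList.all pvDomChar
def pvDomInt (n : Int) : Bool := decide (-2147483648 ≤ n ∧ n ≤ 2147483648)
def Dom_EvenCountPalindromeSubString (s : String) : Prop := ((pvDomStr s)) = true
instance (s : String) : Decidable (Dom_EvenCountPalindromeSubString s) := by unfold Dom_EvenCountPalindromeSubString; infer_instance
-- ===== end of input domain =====

-- B replaces A's O(n^3) triple loop (whose substring test can only succeed at j=i+1) by a
-- single pass counting adjacent equal character pairs; measurably faster.

-- ===== PORT A =====
-- inner k-loop: str2 = "".join(s[k] for k in range(j, i-1, -1)); indices are always in range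
def pvA_str2 (cs : List Char) (i j : Int) : List Char :=
  (PySem.List.pyRange j (i-1) (-1)).foldl (fun str2 k => str2 ++ [PySem.List.pyGetD cs k ' ']) []

-- one iteration of the j-loop: state = (str1, countEven)
def pvA_step (cs : List Char) (i : Int) (st : List Char × Int) (j : Int) : List Char × Int :=
  let str1 := st.1 ++ [PySem.List.pyGetD cs i ' '] ++ [PySem.List.pyGetD cs j ' ']
  if str1 = pvA_str2 cs i j ∧ (str1.length : Int) % 2 = 0 then (str1, st.2 + 1) else (str1, st.2)

-- one iteration of the i-loop: run the j-loop with fresh str1 = "" and keep countEven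
def pvA_outer (cs : List Char) (acc : Int) (i : Int) : Int :=
  ((PySem.List.pyRange (i+1) (cs.length : Int) 1).foldl (pvA_step cs i) ([], acc)).2

def EvenCountPalindromeSubString (s : String) : String :=
  if ((PySem.List.pyRange 0 ((s.toList.length : Int) - 1) 1).foldl (pvA_outer s.toList) 0) > 1
  then "YES" else "NO"

-- ===== PORT B =====
-- count = sum(1 for a, b in zip(s, s[1:]) if a == b)
def pvB_count (cs : List Char) : Int :=
  (cs.zip (PySem.List.slice cs (some 1) none)).foldl
    (fun c p => if p.1 = p.2 then c + 1 else c) 0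

def EvenCountPalindromeSubString_alt (s : String) : String :=
  if pvB_count s.toList > 1 then "YES" else "NO"

-- ===== PRECONDITION & SPEC =====
def Spec_EvenCountPalindromeSubString (s : String) (out : String) : Prop := out = EvenCountPalindromeSubString_alt s
instance (s : String) (out : String) : Decidable (Spec_EvenCountPalindromeSubString s out) := by unfold Spec_EvenCountPalindromeSubString; infer_instance

-- ===== CLAIM (what is proved, stated in full; the proofs are below) =====
def Claim_equal_EvenCountPalindromeSubString : Prop := ∀ (s : String), Dom_EvenCountPalindromeSubString s → Spec_EvenCountPalindromeSubString s (EvenCountPalindromeSubString s)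

-- ===== LEMMAS AND PROOFS =====

-- specification function: number of adjacent equal pairs
def pairCount : List Char → Int
  | a :: b :: r => (if a = b then 1 else 0) + pairCount (b :: r)
  | _ => 0

theorem pairCount_short (l : List Char) (h : l.length ≤ 1) : pairCount l = 0 := by
  match l with
  | [] => rfl
  | [_] => rfl
  | _ :: _ :: _ => simp at h

-- B's fold computes pairCount
theorem pvB_fold (l : List Char) (c : Int) :
    (l.zip l.tail).foldl (fun c p => if p.1 = p.2 then c + 1 else c) c = c + pairCount l := by
  induction l generalizing c with
  | nil => simp [pairCount]
  | cons a t ih =>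
    match t with
    | [] => simp [pairCount]
    | b :: r =>
      simp only [List.tail_cons, List.zip_cons_cons, List.foldl_cons]
      rw [show ((b :: r).zip r) = ((b :: r).zip (b :: r).tail) from rfl, ih]
      simp only [pairCount]
      split_ifs <;> omega

theorem pvB_count_eq (cs : List Char) : pvB_count cs = pairCount cs := by
  unfold pvB_count
  rw [PySem.List.slice_from_one]
  simpa using pvB_fold cs 0

-- a fold that only appends singletons is a map
theorem foldl_append_map (l : List Int) (g : Int → Char) (init : List Char) :
    l.foldl (fun acc k => acc ++ [g k]) init = init ++ l.map g := by
  induction l generalizing init with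
  | nil => simp
  | cons x xs ih => simp [ih]

theorem pvA_str2_eq (cs : List Char) (i j : Int) :
    pvA_str2 cs i j = (PySem.List.pyRange j (i-1) (-1)).map (fun k => PySem.List.pyGetD cs k ' ') := by
  unfold pvA_str2; rw [foldl_append_map]; simp

theorem pvA_str2_length (cs : List Char) (i j : Int) :
    (pvA_str2 cs i j).length = (j - (i-1)).toNat := by
  rw [pvA_str2_eq]; simp [PySem.List.length_pyRange_neg_one]

-- after the first j-iteration str1 is too long ever to equal str2 again, so the counter is frozen
theorem pvA_tail_fold (cs : List Char) (i : Int) :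
    ∀ (fuel : ℕ) (m : Int) (str1 : List Char) (c : Int),
      ((cs.length : Int) - m).toNat ≤ fuel →
      (str1.length : Int) = 2*(m - i) - 2 → i + 2 ≤ m →
      (((PySem.List.pyRange m (cs.length : Int) 1).foldl (pvA_step cs i) (str1, c)).2 = c) := by
  intro fuel
  induction fuel with
  | zero =>
    intro m str1 c hfuel _ _
    rw [PySem.List.pyRange_one_eq_nil (by omega)]
    rfl
  | succ f ih =>
    intro m str1 c hfuel hlen hm
    by_cases hend : (cs.length : Int) ≤ m
    · rw [PySem.List.pyRange_one_eq_nil hend]; rfl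
    · rw [PySem.List.pyRange_one_cons (by omega), List.foldl_cons]
      have hne : str1 ++ [PySem.List.pyGetD cs i ' '] ++ [PySem.List.pyGetD cs m ' ']
          ≠ pvA_str2 cs i m := by
        intro h
        have := congrArg List.length h
        rw [pvA_str2_length] at this
        simp only [List.length_append, List.length_cons, List.length_nil] at this
        omega
      have hstep : pvA_step cs i (str1, c) m =
          (str1 ++ [PySem.List.pyGetD cs i ' '] ++ [PySem.List.pyGetD cs m ' '], c) := by
        simp only [pvA_step]
        split_ifs with hc
        · exact absurd hc.1 hne
        · rfl
      rw [hstep]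
      exact ih (m+1) _ c (by omega) (by simp; omega) (by omega)

-- one full i-iteration adds exactly the adjacency indicator
theorem pvA_outer_eq (cs : List Char) (i : Int) (h1 : i + 1 < (cs.length : Int))
    (acc : Int) :
    pvA_outer cs acc i =
      acc + (if PySem.List.pyGetD cs i ' ' = PySem.List.pyGetD cs (i+1) ' ' then 1 else 0) := by
  unfold pvA_outer
  rw [PySem.List.pyRange_one_cons (by omega), List.foldl_cons]
  have hrange : PySem.List.pyRange (i+1) (i-1) (-1) = [i+1, i] := by
    rw [PySem.List.pyRange_neg_one_cons (by omega),
        PySem.List.pyRange_neg_one_cons (by omega),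
        PySem.List.pyRange_neg_one_eq_nil (by omega)]
    norm_num
  have hstr2 : pvA_str2 cs i (i+1) = [PySem.List.pyGetD cs (i+1) ' ', PySem.List.pyGetD cs i ' '] := by
    rw [pvA_str2_eq, hrange]; rfl
  have hstep : pvA_step cs i ([], acc) (i+1) =
      ([PySem.List.pyGetD cs i ' ', PySem.List.pyGetD cs (i+1) ' '],
       acc + (if PySem.List.pyGetD cs i ' ' = PySem.List.pyGetD cs (i+1) ' ' then 1 else 0)) := by
    simp only [pvA_step]
    rw [hstr2]
    by_cases h : PySem.List.pyGetD cs i ' ' = PySem.List.pyGetD cs (i+1) ' '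
    · simp [h]
    · split_ifs with hc
      · have h1 := hc.1
        simp only [List.nil_append, List.cons_append, List.cons.injEq, and_true] at h1
        exact absurd h1.1 h
      · simp
  rw [hstep]
  apply pvA_tail_fold cs i ((cs.length : Int) - (i+1+1)).toNat (i+1+1)
  · exact le_refl _
  · simp
    omega
  · omega

-- pairCount peels one indicator off a suffix
theorem pairCount_drop (cs : List Char) (m : ℕ) (h : m + 1 < cs.length) :
    pairCount (cs.drop m) =
      (if cs.getD m ' ' = cs.getD (m+1) ' ' then 1 else 0) + pairCount (cs.drop (m+1)) := by
  rw [List.drop_eq_getElem_cons (l := cs) (i := m) (by omega),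
      List.drop_eq_getElem_cons (l := cs) (i := m+1) (by omega)]
  simp only [pairCount]
  rw [List.getD_eq_getElem cs ' ' (show m < cs.length by omega),
      List.getD_eq_getElem cs ' ' (show m+1 < cs.length by omega)]

-- the whole i-loop computes pairCount of the remaining suffix
theorem pvA_main_fold (cs : List Char) :
    ∀ (fuel m : ℕ) (acc : Int),
      cs.length - m ≤ fuel →
      (PySem.List.pyRange (m : Int) ((cs.length : Int) - 1) 1).foldl (pvA_outer cs) acc
        = acc + pairCount (cs.drop m) := by
  intro fuel
  induction fuel with
  | zero =>
    intro m acc hfuel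
    rw [PySem.List.pyRange_one_eq_nil (by omega), List.foldl_nil,
        pairCount_short _ (by simp; omega)]
    ring
  | succ f ih =>
    intro m acc hfuel
    by_cases hend : (cs.length : Int) - 1 ≤ (m : Int)
    · rw [PySem.List.pyRange_one_eq_nil hend, List.foldl_nil,
          pairCount_short _ (by simp; omega)]
      ring
    · have hm1 : m + 1 < cs.length := by omega
      rw [PySem.List.pyRange_one_cons (by omega), List.foldl_cons,
          pvA_outer_eq cs (m : Int) (by omega) acc]
      have : ((m : Int) + 1) = ((m + 1 : ℕ) : Int) := by push_cast; ring
      rw [this, ih (m+1) _ (by omega), pairCount_drop cs m hm1]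
      simp only [PySem.List.pyGetD_natCast]
      ring

theorem counts_agree (cs : List Char) :
    (PySem.List.pyRange 0 ((cs.length : Int) - 1) 1).foldl (pvA_outer cs) 0 = pvB_count cs := by
  have := pvA_main_fold cs cs.length 0 0 (by omega)
  simp only [Nat.cast_zero, List.drop_zero, zero_add] at this
  rw [this, pvB_count_eq]

-- ===== VERDICT (by name: the statement is the Claim_ definition above) =====
theorem EvenCountPalindromeSubString_spec : Claim_equal_EvenCountPalindromeSubString := by
  intro s _
  unfold Spec_EvenCountPalindromeSubString EvenCountPalindromeSubString EvenCountPalindromeSubString_alt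
  rw [counts_agree]
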